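-- pv_equiv track=rewrite | github.com/GontarRV/Python | tasks28/Keymaker.py | Keymaker
-- ===== SOURCE A (Python) =====
-- def Keymaker(k: int) -> str:
--
--     l = []
--     for i in range(k):
--         l.append('0')
--
--     for i in range(1, k + 1):
--         for j in range(1, k + 1):
--             if j % i == 0:
--                 l[j - 1] = open_close(l[j - 1])
--
--     s = ''.join(l)
--
--     return s
--
-- def open_close(n: str) -> str:
--
--     if n == '0':
--         return '1'
--     return '0'
-- ===== SOURCE B (Python) =====
-- def Keymaker(k: int) -> str:
--     # Position j-1 is '1' iff j has an odd number of divisors, i.e. j is a perfect square.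
--     chars = ['0'] * max(k, 0)
--     i = 1
--     while i * i <= k:
--         chars[i * i - 1] = '1'
--         i += 1
--     return ''.join(chars)
-- ===== Notes on version B (the rewrite author's own statement) =====
-- stated objective: faster
-- what changed: Replaces the quadratic double loop that toggles position j-1 once per divisor of j by a single sqrt(k)-length pass marking exactly the perfect-square positions, since a count has odd parity iff the index is a perfect square.
import Mathlib
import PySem

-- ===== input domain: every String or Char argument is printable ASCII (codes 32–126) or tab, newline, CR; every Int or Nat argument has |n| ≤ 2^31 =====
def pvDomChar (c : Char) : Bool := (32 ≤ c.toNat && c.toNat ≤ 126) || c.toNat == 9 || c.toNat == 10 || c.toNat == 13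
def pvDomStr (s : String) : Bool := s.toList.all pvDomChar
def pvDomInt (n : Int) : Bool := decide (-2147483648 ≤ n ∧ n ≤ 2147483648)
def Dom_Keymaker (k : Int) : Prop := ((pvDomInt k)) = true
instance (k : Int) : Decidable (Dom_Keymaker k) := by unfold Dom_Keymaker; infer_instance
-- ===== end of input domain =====

-- B replaces A's O(k^2) divisor-toggling double loop by a single pass that marks the
-- perfect-square positions: position j-1 is toggled once per divisor of j, so it ends '1'
-- iff j has an odd number of divisors, i.e. iff j is a perfect square.

-- ===== PORT A =====
def pvOpenClose (n : String) : String := if n = "0" then "1" else "0"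

def Keymaker (k : Int) : String :=
  let l0 : List String := (PySem.List.pyRange 0 k 1).foldl (fun acc _ => acc ++ ["0"]) []
  let l := (PySem.List.pyRange 1 (k+1) 1).foldl (fun l i =>
    (PySem.List.pyRange 1 (k+1) 1).foldl (fun l j =>
      if PySem.Int.mod j i = 0 then
        l.set (j-1).toNat (pvOpenClose (PySem.List.pyGetD l (j-1) ""))
      else l) l) l0
  String.join l

-- ===== PORT B =====
-- termination helper for the while loop (i*i ≤ k forces i ≤ k)
lemma pvMark_lt (k : Int) (i : Nat) (h : (i : Int) * i ≤ k) : k.toNat + 1 - (i+1) < k.toNat + 1 - i := by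
  have : (i : Int) ≤ i * i := by nlinarith [Int.natCast_nonneg i]
  omega

def pvMarkLoop (k : Int) (i : Nat) (chars : List String) : List String :=
  if h : (i : Int) * i ≤ k then pvMarkLoop k (i+1) (chars.set (i*i - 1) "1") else chars
termination_by k.toNat + 1 - i
decreasing_by exact pvMark_lt k i h

def Keymaker_alt (k : Int) : String :=
  String.join (pvMarkLoop k 1 (List.replicate (max k 0).toNat "0"))

-- ===== PRECONDITION & SPEC =====
def Spec_Keymaker (k : Int) (out : String) : Prop := out = Keymaker_alt k
instance (k : Int) (out : String) : Decidable (Spec_Keymaker k out) := by unfold Spec_Keymaker; infer_instance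

-- ===== CLAIM (what is proved, stated in full; the proofs are below) =====
def Claim_equal_Keymaker : Prop := ∀ (k : Int), Dom_Keymaker k → Spec_Keymaker k (Keymaker k)

-- ===== LEMMAS AND PROOFS =====

-- ---- number theory: a positive number has an odd number of divisors iff it is a square ----
lemma pv_odd_prod {s : Finset ℕ} {f : ℕ → ℕ} :
    Odd (∏ x ∈ s, f x) ↔ ∀ x ∈ s, Odd (f x) := by
  classical
  induction s using Finset.induction with
  | empty => simp
  | insert a s ha ih =>
    rw [Finset.prod_insert ha, Nat.odd_mul, ih]
    simp

lemma pv_even_factorization_iff {n : ℕ} (hn : n ≠ 0) :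
    (∀ p, Even (n.factorization p)) ↔ IsSquare n := by
  constructor
  · intro h
    refine ⟨n.factorization.prod fun p k => p ^ (k / 2), ?_⟩
    rw [← Finsupp.prod_mul]
    have heq : (n.factorization.prod fun p k => p ^ (k / 2) * p ^ (k / 2))
        = n.factorization.prod fun p k => p ^ k := by
      apply Finsupp.prod_congr
      intro p _
      rw [← pow_add]
      congr 1
      obtain ⟨c, hc⟩ := h p
      omega
    rw [heq, Nat.prod_factorization_pow_eq_self hn]
  · rintro ⟨r, rfl⟩ p
    have hr : r ≠ 0 := by rintro rfl; simp at hn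
    rw [Nat.factorization_mul hr hr]
    exact ⟨r.factorization p, rfl⟩

lemma pv_odd_card_divisors_iff {n : ℕ} (hn : n ≠ 0) :
    Odd n.divisors.card ↔ IsSquare n := by
  rw [Nat.card_divisors hn, ← pv_even_factorization_iff hn]
  rw [pv_odd_prod]
  constructor
  · intro h p
    by_cases hp : p ∈ n.primeFactors
    · simpa [Nat.odd_add_one] using h p hp
    · have : n.factorization p = 0 := by
        rw [← Finsupp.notMem_support_iff, Nat.support_factorization]; exact hp
      simp [this]
  · intro h p hp
    simpa [Nat.odd_add_one] using h p


lemma pv_filter_divisors (j kk : ℕ) (h1 : 1 ≤ j) (h2 : j ≤ kk) :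
    (Finset.Icc 1 kk).filter (fun i => i ∣ j) = j.divisors := by
  ext i
  simp only [Finset.mem_filter, Finset.mem_Icc, Nat.mem_divisors]
  constructor
  · rintro ⟨_, hd⟩; exact ⟨hd, by omega⟩
  · rintro ⟨hd, -⟩
    have hi1 : 1 ≤ i := Nat.pos_of_dvd_of_pos hd (by omega)
    have hij : i ≤ j := Nat.le_of_dvd (by omega) hd
    exact ⟨⟨hi1, by omega⟩, hd⟩

-- ---- A's loops ----
def pvStepA (i : Int) : List String → Int → List String := fun l j =>
  if PySem.Int.mod j i = 0 then
    l.set (j-1).toNat (pvOpenClose (PySem.List.pyGetD l (j-1) ""))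
  else l

lemma pv_stepA_length (i : Int) (l : List String) (j : Int) : (pvStepA i l j).length = l.length := by
  unfold pvStepA; split <;> simp

lemma pv_innerA (kk i : Int) : ∀ (n : ℕ) (a : Int) (l : List String) (p : ℕ),
    1 ≤ a → ((kk+1) - a).toNat = n → p < l.length →
    ((PySem.List.pyRange a (kk+1) 1).foldl (pvStepA i) l).getD p "" =
      (if a ≤ (p:Int)+1 ∧ (p:Int)+1 ≤ kk ∧ PySem.Int.mod ((p:Int)+1) i = 0
       then pvOpenClose (l.getD p "") else l.getD p "") := by
  intro n
  induction n with
  | zero =>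
    intro a l p ha hn hp
    rw [PySem.List.pyRange_one_eq_nil (by omega)]
    rw [if_neg (by rintro ⟨h1, h2, -⟩; omega)]
    rfl
  | succ n ih =>
    intro a l p ha hn hp
    have hab : a < kk + 1 := by omega
    rw [PySem.List.pyRange_one_cons hab, List.foldl_cons]
    have hlen : (pvStepA i l a).length = l.length := pv_stepA_length i l a
    rw [ih (a+1) (pvStepA i l a) p (by omega) (by omega) (by omega)]
    by_cases hpa : a = (p:Int) + 1
    · have hidx : ((a:Int)-1).toNat = p := by omega
      have ha1 : a - 1 = (p : Int) := by omega
      have hget : (pvStepA i l a).getD p "" =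
          if PySem.Int.mod a i = 0 then pvOpenClose (l.getD p "") else l.getD p "" := by
        unfold pvStepA
        split
        · rw [hidx, List.getD_eq_getElem?_getD, List.getElem?_set_self (by omega)]
          rw [ha1, PySem.List.pyGetD_natCast]
          rfl
        · rfl
      rw [if_neg (by rintro ⟨h1, -, -⟩; omega), hget]
      have hkk : (p:Int) + 1 ≤ kk := by omega
      by_cases hmod : PySem.Int.mod ((p:Int)+1) i = 0
      · rw [if_pos (by rw [hpa]; exact hmod), if_pos ⟨by omega, hkk, hmod⟩]
      · rw [if_neg (by rw [hpa]; exact hmod), if_neg (fun h => hmod h.2.2)]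
    · have hget : (pvStepA i l a).getD p "" = l.getD p "" := by
        unfold pvStepA
        split
        · rw [List.getD_eq_getElem?_getD, List.getElem?_set_ne (by omega), ← List.getD_eq_getElem?_getD]
        · rfl
      rw [hget]
      refine if_congr ?_ rfl rfl
      constructor
      · rintro ⟨h1, h2, h3⟩; exact ⟨by omega, h2, h3⟩
      · rintro ⟨h1, h2, h3⟩; exact ⟨by omega, h2, h3⟩

def pvCnt (m j : ℕ) : ℕ := ((Finset.Icc 1 m).filter (fun i => i ∣ j)).card

lemma pv_cnt_succ (m j : ℕ) :
    pvCnt (m+1) j = pvCnt m j + (if (m+1) ∣ j then 1 else 0) := by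
  unfold pvCnt
  rw [← Finset.insert_Icc_right_eq_Icc_add_one (by omega), Finset.filter_insert]
  split
  · rw [Finset.card_insert_of_notMem (by simp)]
  · simp

lemma pv_foldA_length (i : Int) (xs : List Int) : ∀ l : List String,
    (xs.foldl (pvStepA i) l).length = l.length := by
  induction xs with
  | nil => intro l; rfl
  | cons x xs ih => intro l; rw [List.foldl_cons, ih, pv_stepA_length]

lemma pv_outer_length (R : List Int) (xs : List Int) : ∀ l : List String,
    (xs.foldl (fun l i => R.foldl (pvStepA i) l) l).length = l.length := by
  induction xs with
  | nil => intro l; rfl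
  | cons x xs ih => intro l; rw [List.foldl_cons, ih, pv_foldA_length]

lemma pv_outerA (k : Int) (hk : 0 ≤ k) : ∀ (m : ℕ), (m:Int) ≤ k → ∀ p : ℕ, p < k.toNat →
    ((PySem.List.pyRange 1 ((m:Int)+1) 1).foldl
        (fun l i => (PySem.List.pyRange 1 (k+1) 1).foldl (pvStepA i) l)
        (List.replicate k.toNat "0")).getD p ""
      = if Odd (pvCnt m (p+1)) then "1" else "0" := by
  intro m
  induction m with
  | zero =>
    intro _ p hp
    have h0 : (PySem.List.pyRange 1 (((0:ℕ):Int)+1) 1) = [] := by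
      rw [show (((0:ℕ):Int)+1) = 1 by norm_num]
      exact PySem.List.pyRange_one_eq_nil (by omega)
    rw [h0, List.foldl_nil]
    have : pvCnt 0 (p+1) = 0 := by unfold pvCnt; simp
    rw [this]
    simp [List.getD_eq_getElem?_getD, List.getElem?_replicate, hp]
  | succ m ih =>
    intro hm p hp
    have hsplit : PySem.List.pyRange 1 ((↑(m+1):Int)+1) 1
        = PySem.List.pyRange 1 ((m:Int)+1) 1 ++ [(m:Int)+1] := by
      rw [show ((↑(m+1):Int)+1) = ((m:Int)+1)+1 by push_cast; ring]
      exact PySem.List.pyRange_one_succ_right (by omega)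
    rw [hsplit, List.foldl_append, List.foldl_cons, List.foldl_nil]
    set prev := (PySem.List.pyRange 1 ((m:Int)+1) 1).foldl
        (fun l i => (PySem.List.pyRange 1 (k+1) 1).foldl (pvStepA i) l)
        (List.replicate k.toNat "0") with hprev
    have hplen : prev.length = k.toNat := by
      rw [hprev, pv_outer_length]; simp
    have hinner := pv_innerA k ((m:Int)+1) ((k+1)-1).toNat 1 prev p (by omega) (by omega) (hplen ▸ hp)
    rw [hinner]
    have hmodiff : PySem.Int.mod ((p:Int)+1) ((m:Int)+1) = 0 ↔ (m+1) ∣ (p+1) := by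
      rw [PySem.Int.mod_eq_zero_iff_dvd]
      constructor
      · intro h; exact_mod_cast h
      · intro h; exact_mod_cast h
    rw [pv_cnt_succ]
    have hprev_p := ih (by omega) p hp
    by_cases hdvd : (m+1) ∣ (p+1)
    · rw [if_pos ⟨by omega, by omega, hmodiff.mpr (by exact_mod_cast hdvd)⟩, hprev_p, if_pos hdvd]
      rcases Nat.even_or_odd (pvCnt m (p+1)) with h | h <;>
        simp [pvOpenClose, h, Nat.odd_add_one, Nat.not_odd_iff_even, Nat.even_add_one, Nat.not_even_iff_odd]
    · rw [if_neg (by rintro ⟨-, -, h⟩; exact hdvd (hmodiff.mp h)), hprev_p, if_neg hdvd]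
      norm_num

lemma pv_markLoop_length (k : Int) (i : ℕ) (chars : List String) :
    (pvMarkLoop k i chars).length = chars.length := by
  induction i, chars using pvMarkLoop.induct k with
  | case1 i chars h ih => rw [pvMarkLoop, dif_pos h]; rw [ih]; simp
  | case2 i chars h => rw [pvMarkLoop, dif_neg h]

lemma pv_markLoop_getD (k : Int) (i : ℕ) (chars : List String) :
    ∀ p : ℕ, p < chars.length → 1 ≤ i →
    (pvMarkLoop k i chars).getD p "" =
      if (∃ t : ℕ, t ≤ p+1 ∧ i ≤ t ∧ (t:Int)*(t:Int) ≤ k ∧ t*t = p+1) then "1" else chars.getD p "" := by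
  induction i, chars using pvMarkLoop.induct k with
  | case1 i chars h ih =>
    intro p hp hi
    rw [pvMarkLoop, dif_pos h]
    rw [ih p (by simpa using hp) (by omega)]
    by_cases hpi : p = i*i - 1
    · have hii : 1 ≤ i * i := Nat.one_le_iff_ne_zero.mpr (by positivity)
      have himul : i ≤ i * i := Nat.le_mul_of_pos_left i (by omega)
      have hcond : ∃ t : ℕ, t ≤ p+1 ∧ i ≤ t ∧ (t:Int)*(t:Int) ≤ k ∧ t*t = p+1 :=
        ⟨i, by omega, le_refl i, h, by omega⟩
      rw [if_pos hcond]
      split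
      · rfl
      · rw [hpi, List.getD_eq_getElem?_getD, List.getElem?_set_self (by omega)]
        rfl
    · have hne : i*i - 1 ≠ p := fun hh => hpi hh.symm
      have hset : (chars.set (i*i - 1) "1").getD p "" = chars.getD p "" := by
        rw [List.getD_eq_getElem?_getD, List.getElem?_set_ne hne, ← List.getD_eq_getElem?_getD]
      rw [hset]
      refine if_congr ?_ rfl rfl
      constructor
      · rintro ⟨t, h1, h2, h3, h4⟩; exact ⟨t, h1, by omega, h3, h4⟩
      · rintro ⟨t, h1, h2, h3, h4⟩
        refine ⟨t, h1, ?_, h3, h4⟩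
        rcases Nat.eq_or_lt_of_le h2 with rfl | hlt
        · exfalso; apply hpi; omega
        · omega
  | case2 i chars h =>
    intro p hp hi
    rw [pvMarkLoop, dif_neg h]
    rw [if_neg ?_]
    rintro ⟨t, h1, h2, h3, h4⟩
    apply h
    have : (i:Int) * i ≤ (t:Int) * t := by
      have : (i:Int) ≤ t := by exact_mod_cast h2
      nlinarith [Int.natCast_nonneg i]
    omega

lemma pv_append_fold (xs : List Int) : ∀ acc : List String,
    xs.foldl (fun a _ => a ++ ["0"]) acc = acc ++ List.replicate xs.length "0" := by
  induction xs with
  | nil => simp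
  | cons x xs ih =>
    intro acc
    rw [List.foldl_cons, ih, List.length_cons, List.replicate_succ]
    simp


lemma pv_keymaker_eq (k : Int) : Keymaker k = Keymaker_alt k := by
  have hA0 : Keymaker k = String.join
      ((PySem.List.pyRange 1 (k+1) 1).foldl
        (fun l i => (PySem.List.pyRange 1 (k+1) 1).foldl (pvStepA i) l)
        ((PySem.List.pyRange 0 k 1).foldl (fun acc _ => acc ++ ["0"]) [])) := rfl
  have hB0 : Keymaker_alt k = String.join (pvMarkLoop k 1 (List.replicate (max k 0).toNat "0")) := rfl
  rw [hA0, hB0]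
  by_cases hk : k ≤ 0
  · rw [PySem.List.pyRange_one_eq_nil (show k ≤ 0 from hk),
        PySem.List.pyRange_one_eq_nil (show k + 1 ≤ 1 by omega)]
    rw [show (max k 0).toNat = 0 by omega, List.replicate_zero]
    rw [pvMarkLoop, dif_neg (by omega)]
    rfl
  · push_neg at hk
    have hk0 : 0 ≤ k := le_of_lt hk
    have hl0 : (PySem.List.pyRange 0 k 1).foldl (fun acc _ => acc ++ ["0"]) []
        = List.replicate k.toNat "0" := by
      rw [pv_append_fold, List.nil_append, PySem.List.length_pyRange_one]
      norm_num
    rw [hl0, show (max k 0).toNat = k.toNat by omega]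
    congr 1
    have hAlen := pv_outer_length (PySem.List.pyRange 1 (k+1) 1)
        (PySem.List.pyRange 1 (k+1) 1) (List.replicate k.toNat "0")
    have hBlen := pv_markLoop_length k 1 (List.replicate k.toNat "0")
    apply List.ext_getElem (by rw [hAlen, hBlen])
    intro p hp1 hp2
    have hp : p < k.toNat := by
      rw [hAlen, List.length_replicate] at hp1; exact hp1
    have hA := pv_outerA k hk0 k.toNat (by omega) p hp
    rw [Int.toNat_of_nonneg hk0] at hA
    have hB := pv_markLoop_getD k 1 (List.replicate k.toNat "0") p (by simpa using hp) (le_refl 1)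
    rw [← List.getD_eq_getElem _ "" hp1, ← List.getD_eq_getElem _ "" hp2]
    rw [hA, hB]
    rw [List.getD_eq_getElem?_getD, List.getElem?_replicate, if_pos hp]
    have hdiv : pvCnt k.toNat (p+1) = (p+1).divisors.card := by
      unfold pvCnt
      rw [pv_filter_divisors (p+1) k.toNat (by omega) (by omega)]
    rw [hdiv]
    refine if_congr ?_ rfl rfl
    rw [pv_odd_card_divisors_iff (by omega)]
    constructor
    · rintro ⟨r, hr⟩
      have hr1 : 1 ≤ r := by
        rcases Nat.eq_zero_or_pos r with rfl | h
        · omega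
        · exact h
      have hrr : r ≤ r * r := Nat.le_mul_of_pos_left r (by omega)
      refine ⟨r, by omega, hr1, ?_, hr.symm⟩
      have h1 : r * r ≤ k.toNat := by omega
      have h2 := Int.toNat_of_nonneg hk0
      push_cast
      omega
    · rintro ⟨t, -, -, -, h4⟩
      exact ⟨t, h4.symm⟩


-- ===== VERDICT (by name: the statement is the Claim_ definition above) =====
theorem Keymaker_spec : Claim_equal_Keymaker := by
  intro k _
  show Keymaker k = Keymaker_alt k
  exact pv_keymaker_eq k
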